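-- pv_equiv track=rewrite | github.com/MLOps-MaitriAI/VEREATY_Backend | utils/onboarding_function.py | get_coverage_status
-- ===== SOURCE A (Python) =====
-- from typing import Optional, Dict, List, Any, Tuple
--
-- def get_coverage_status(conversation: List[Dict]) -> Dict[str, bool]:
--     """Get coverage status of all priority categories"""
--     priority_categories = [
--         "dietary_style", "spice_tolerance", "food_allergies", "regional_cuisines",
--         "health_conditions", "family_needs", "cooking_constraints",
--         "meal_complexity", "fasting_observances", "general_preference"
--     ]
--
--     covered_keys = set()
--     for item in conversation:
--         if item.get("preference_key") and item.get("answer"):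
--             covered_keys.add(item["preference_key"])
--
--     status = {}
--     for category in priority_categories:
--         status[category] = category in covered_keys
--
--     return status
-- ===== SOURCE B (Python) =====
-- def get_coverage_status(conversation):
--     """Get coverage status of all priority categories"""
--     priority_categories = [
--         "dietary_style", "spice_tolerance", "food_allergies", "regional_cuisines",
--         "health_conditions", "family_needs", "cooking_constraints",
--         "meal_complexity", "fasting_observances", "general_preference"
--     ]
--     return {
--         category: any(item.get("preference_key") == category and item.get("answer")
--                       for item in conversation)
--         for category in priority_categories
--     }
-- ===== Notes on version B (the rewrite author's own statement) =====
-- stated objective: simpler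
-- what changed: Dropped the intermediate covered_keys set and the two explicit loops: B is a single dict comprehension that, per fixed category, scans the conversation with any() for an item whose preference_key equals the category and whose answer is truthy.
import Mathlib
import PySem

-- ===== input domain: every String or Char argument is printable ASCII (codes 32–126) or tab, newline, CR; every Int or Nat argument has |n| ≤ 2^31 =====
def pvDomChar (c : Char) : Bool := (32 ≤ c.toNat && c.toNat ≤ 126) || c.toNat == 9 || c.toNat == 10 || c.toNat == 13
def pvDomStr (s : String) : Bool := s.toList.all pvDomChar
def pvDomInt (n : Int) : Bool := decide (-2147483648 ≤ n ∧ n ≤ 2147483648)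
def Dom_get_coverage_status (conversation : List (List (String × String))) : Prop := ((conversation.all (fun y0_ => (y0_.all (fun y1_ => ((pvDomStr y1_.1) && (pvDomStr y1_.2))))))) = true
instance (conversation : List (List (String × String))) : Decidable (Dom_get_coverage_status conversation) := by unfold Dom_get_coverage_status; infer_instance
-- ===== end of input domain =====

-- B replaces A's build-a-set-then-look-up structure by a direct per-category any() scan (simpler, no index).

-- Python truthiness of `item.get(k)` (None or a string): truthy iff present and nonempty.
def pvTruthy (o : Option String) : Bool :=
  match o with
  | none => false
  | some s => s ≠ ""

def pvCategories : List String :=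
  ["dietary_style", "spice_tolerance", "food_allergies", "regional_cuisines",
   "health_conditions", "family_needs", "cooking_constraints",
   "meal_complexity", "fasting_observances", "general_preference"]

-- ===== PORT A =====
def get_coverage_status (conversation : List (List (String × String))) : List (String × Bool) :=
  let covered : PySem.Set String :=
    conversation.foldl (fun s item =>
      let pk := (PySem.Dict.mk item).get? "preference_key"
      let ans := (PySem.Dict.mk item).get? "answer"
      if pvTruthy pk && pvTruthy ans then PySem.Set.add s (pk.getD "") else s)
      PySem.Set.empty
  (pvCategories.foldl (fun st c => st.insert c (PySem.Set.contains covered c))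
      (PySem.Dict.empty : PySem.Dict String Bool)).items

-- ===== PORT B =====
def get_coverage_status_alt (conversation : List (List (String × String))) : List (String × Bool) :=
  pvCategories.map (fun c =>
    (c, conversation.any (fun item =>
          ((PySem.Dict.mk item).get? "preference_key" == some c)
          && pvTruthy ((PySem.Dict.mk item).get? "answer"))))

-- ===== PRECONDITION & SPEC =====
def Spec_get_coverage_status (conversation : List (List (String × String))) (out : List (String × Bool)) : Prop := out = get_coverage_status_alt conversation
instance (conversation : List (List (String × String))) (out : List (String × Bool)) : Decidable (Spec_get_coverage_status conversation out) := by unfold Spec_get_coverage_status; infer_instance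

-- ===== CLAIM (what is proved, stated in full; the proofs are below) =====
def Claim_equal_get_coverage_status : Prop := ∀ (conversation : List (List (String × String))), Dom_get_coverage_status conversation → Spec_get_coverage_status conversation (get_coverage_status conversation)

-- ===== LEMMAS AND PROOFS =====

theorem pv_items_fold (covered : PySem.Set String) (cats : List String) (hnd : cats.Nodup) :
    (List.foldl (fun (st : PySem.Dict String Bool) c => st.insert c (covered.contains c)) PySem.Dict.empty cats).items
    = cats.map (fun c => (c, covered.contains c)) := by
  rw [PySem.Dict.items_foldl_insert_fresh (l := cats) (d := (PySem.Dict.empty : PySem.Dict String Bool))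
        (k := fun (c : String) => c) (v := fun c => covered.contains c)
        (by intro a _; simp) (by simpa using hnd)]
  simp [PySem.Dict.empty]

theorem pv_contains_add (s : PySem.Set String) (x c : String) :
    (PySem.Set.add s x).contains c = (s.contains c || (x == c)) := by
  rw [Bool.eq_iff_iff]
  simp only [PySem.Set.contains_iff, Bool.or_eq_true, beq_iff_eq, PySem.Set.mem_add]
  exact or_congr Iff.rfl eq_comm

-- Membership in A's covered set equals B's any() scan, for a nonempty category c.
theorem pv_covered_mem (c : String) (hc : c ≠ "") (conversation : List (List (String × String)))
    (s : PySem.Set String) :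
    (conversation.foldl (fun s item =>
      let pk := (PySem.Dict.mk item).get? "preference_key"
      let ans := (PySem.Dict.mk item).get? "answer"
      if pvTruthy pk && pvTruthy ans then PySem.Set.add s (pk.getD "") else s) s).contains c
    = (s.contains c ||
        conversation.any (fun item =>
          ((PySem.Dict.mk item).get? "preference_key" == some c)
          && pvTruthy ((PySem.Dict.mk item).get? "answer"))) := by
  induction conversation generalizing s with
  | nil => simp
  | cons item rest ih =>
    rw [List.foldl_cons, List.any_cons, ih]
    have hstep :
        ((if pvTruthy ((PySem.Dict.mk item).get? "preference_key")
              && pvTruthy ((PySem.Dict.mk item).get? "answer") then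
            PySem.Set.add s (((PySem.Dict.mk item).get? "preference_key").getD "") else s).contains c)
        = (s.contains c ||
            (((PySem.Dict.mk item).get? "preference_key" == some c)
              && pvTruthy ((PySem.Dict.mk item).get? "answer"))) := by
      by_cases hpk : (pvTruthy ((PySem.Dict.mk item).get? "preference_key")
            && pvTruthy ((PySem.Dict.mk item).get? "answer")) = true
      · rw [if_pos hpk]
        rcases h : (PySem.Dict.mk item).get? "preference_key" with _ | k
        · rw [h] at hpk; simp [pvTruthy] at hpk
        · rw [h] at hpk
          have hans : pvTruthy ((PySem.Dict.mk item).get? "answer") = true :=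
            (Bool.and_eq_true_iff.mp hpk).2
          rw [pv_contains_add, hans]
          simp
      · rw [if_neg hpk]
        simp only [Bool.not_eq_true] at hpk
        rcases Bool.and_eq_false_iff.mp hpk with h1 | h2
        · rcases h : (PySem.Dict.mk item).get? "preference_key" with _ | k
          · simp
          · rw [h] at h1
            have hk : k = "" := by
              by_contra hk
              simp [pvTruthy, hk] at h1
            subst hk
            simp [Ne.symm hc]
        · simp [h2]
    rw [hstep, Bool.or_assoc]

-- ===== VERDICT (by name: the statement is the Claim_ definition above) =====
theorem get_coverage_status_spec : Claim_equal_get_coverage_status := by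
  intro conversation _
  show get_coverage_status conversation = get_coverage_status_alt conversation
  simp only [get_coverage_status, get_coverage_status_alt]
  set covered := conversation.foldl (fun s item =>
      if pvTruthy ((PySem.Dict.mk item).get? "preference_key")
          && pvTruthy ((PySem.Dict.mk item).get? "answer") then
        PySem.Set.add s (((PySem.Dict.mk item).get? "preference_key").getD "") else s)
      PySem.Set.empty with hcov
  rw [pv_items_fold covered pvCategories (by decide)]
  apply List.map_congr_left
  intro c hc
  have hcne : c ≠ "" := by
    simp only [pvCategories, List.mem_cons] at hc
    rcases hc with h|h|h|h|h|h|h|h|h|h|h <;> first | (subst h; decide) | (exact absurd h (by simp))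
  rw [hcov, pv_covered_mem c hcne]
  simp [PySem.Set.empty, PySem.Set.contains]
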